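-- pv_equiv track=rewrite | github.com/PoliciyaNrawow/DigitalWatermarks | api_galois_fields.py | cl_div
-- ===== SOURCE A (Python) =====
-- def bit_length(n):
--    '''Compute the position of the most significant bit (1) of an integer. Equivalent to int.bit_length()'''
--    bits = 0
--    while n >> bits: bits += 1
--    return bits
--
-- def cl_div(dividend, divisor=None):
--    '''Bitwise carry-less long division on integers and returns the remainder'''
--    # Compute the position of the most significant bit for each integers
--    dl1 = bit_length(dividend)
--    dl2 = bit_length(divisor)
--    # If the dividend is smaller than the divisor, just exit
--    if dl1 < dl2:
--       return dividend
--    # Else, align the most significant 1 of the divisor to the most significant 1 of the dividend (by shifting the divisor)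
--    for i in range(dl1 - dl2, -1, -1):
--       # Check that the dividend is divisible (useless for the first iteration but important for the next ones)
--       if dividend & (1 << i + dl2 - 1):
--          # If divisible, then shift the divisor to align the most significant bits and XOR (carry-less subtraction)
--          dividend ^= divisor << i
--    return dividend
-- ===== SOURCE B (Python) =====
-- def cl_div(dividend, divisor=None):
--    '''Bitwise carry-less long division on integers and returns the remainder'''
--    # MSB-first shift register (CRC style): feed the dividend's bits one at a time
--    # into a running remainder r, reducing by the divisor whenever r's top bit
--    # reaches the divisor's top bit.  Only the small remainder is ever updated.
--    top = 1 << (divisor.bit_length() - 1)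
--    r = 0
--    for i in range(dividend.bit_length() - 1, -1, -1):
--       r = (r << 1) | ((dividend >> i) & 1)
--       if r & top:
--          r ^= divisor
--    return r
-- ===== Notes on version B (the rewrite author's own statement) =====
-- stated objective: alternative
-- what changed: Replaces A's long division, which repeatedly XORs the shifted divisor into the full dividend at descending alignment positions, by an MSB-first CRC-style shift register that feeds the dividend's bits one at a time into a small running remainder and reduces by the divisor whenever the remainder's top bit reaches the divisor's degree.
import Mathlib
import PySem

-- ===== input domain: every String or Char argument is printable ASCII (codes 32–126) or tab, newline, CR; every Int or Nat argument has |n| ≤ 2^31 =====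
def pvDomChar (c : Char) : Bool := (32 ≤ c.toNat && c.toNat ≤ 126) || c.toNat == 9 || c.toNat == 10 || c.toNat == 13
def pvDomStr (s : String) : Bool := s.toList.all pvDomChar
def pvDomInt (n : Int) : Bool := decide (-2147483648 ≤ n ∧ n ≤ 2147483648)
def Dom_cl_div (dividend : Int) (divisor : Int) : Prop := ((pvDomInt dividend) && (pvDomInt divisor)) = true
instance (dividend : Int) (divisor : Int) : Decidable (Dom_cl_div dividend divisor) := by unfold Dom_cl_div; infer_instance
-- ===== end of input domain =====

-- B replaces A's subtract-shifted-divisor long division over the full dividend by an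
-- MSB-first CRC-style shift register that feeds the dividend's bits into a small running
-- remainder (objective: alternative).  Equivalence is about the RETURN value on Pre_
-- (0 ≤ dividend, 1 ≤ divisor): outside it Python A raises ValueError (divisor = 0,
-- from a negative shift count) or loops forever (negative argument).

-- ===== PORT A =====
-- 'while n >> bits: bits += 1' counts the bits of n; for n ≥ 0 this is the recursion below
-- (for n < 0 the Python loop never terminates — such inputs are outside Pre_).
def bit_length_go (n : Nat) : Nat :=
  if n = 0 then 0 else bit_length_go (n / 2) + 1
termination_by n
decreasing_by exact Nat.div_lt_self (by omega) (by omega)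

def bit_length (n : Int) : Int := (bit_length_go n.toNat : Nat)

-- the '.toNat' on the two shift amounts: Python raises ValueError on a negative shift
-- count (reached only when divisor = 0, outside Pre_); inside Pre_ both are ≥ 0.
def cl_div (dividend : Int) (divisor : Int) : Int :=
  let dl1 := bit_length dividend
  let dl2 := bit_length divisor
  if dl1 < dl2 then dividend
  else
    (PySem.List.pyRange (dl1 - dl2) (-1) (-1)).foldl
      (fun d i =>
        if Int.land d (Int.shiftLeft 1 (i + dl2 - 1).toNat) ≠ 0 then
          Int.xor d (Int.shiftLeft divisor i.toNat)
        else d)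
      dividend

-- ===== PORT B =====
-- int.bit_length() is PySem.Int.bitLength; '1 << (bit_length - 1)' is ported with .toNat
-- on the shift count (negative only when divisor = 0, where Python raises, outside Pre_).
def cl_div_alt (dividend : Int) (divisor : Int) : Int :=
  let top : Int := Int.shiftLeft 1 ((PySem.Int.bitLength divisor : Int) - 1).toNat
  (PySem.List.pyRange ((PySem.Int.bitLength dividend : Int) - 1) (-1) (-1)).foldl
    (fun r i =>
      let r' := PySem.Int.bor (Int.shiftLeft r 1) (PySem.Int.band (dividend >>> i.toNat) 1)
      if PySem.Int.band r' top ≠ 0 then PySem.Int.bxor r' divisor else r')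
    0

-- ===== PRECONDITION & SPEC =====
-- Pre_ excludes exactly the inputs where Python A does not return: divisor = 0 makes A
-- evaluate 1 << -1 and raise ValueError, and a negative dividend or divisor makes A's
-- hand-rolled bit_length while-loop run forever.
def Pre_cl_div (dividend : Int) (divisor : Int) : Prop := 0 ≤ dividend ∧ 1 ≤ divisor
instance (dividend : Int) (divisor : Int) : Decidable (Pre_cl_div dividend divisor) := by
  unfold Pre_cl_div; infer_instance

def pvWitness_cl_div : Int × Int := (45, 5)

def Spec_cl_div (dividend : Int) (divisor : Int) (out : Int) : Prop := out = cl_div_alt dividend divisor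
instance (dividend : Int) (divisor : Int) (out : Int) : Decidable (Spec_cl_div dividend divisor out) := by unfold Spec_cl_div; infer_instance

-- ===== CLAIM (what is proved, stated in full; the proofs are below) =====
def Claim_equal_cl_div : Prop := ∀ (dividend : Int) (divisor : Int), Dom_cl_div dividend divisor → Pre_cl_div dividend divisor → Spec_cl_div dividend divisor (cl_div dividend divisor)

-- ===== LEMMAS AND PROOFS =====

-- Common reference value: the greedy top-bit reduction loop (proof-only; neither port uses it).
-- Termination: XORing the divisor aligned to the current top bit strictly lowers the bit length.
theorem size_xor_shift_lt (b a : Nat) (hb : 0 < b) (h : Nat.size b ≤ Nat.size a) :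
    Nat.size (a ^^^ (b <<< (Nat.size a - Nat.size b))) < Nat.size a := by
  have hj : 0 < Nat.size b := Nat.size_pos.mpr hb
  have hk : 0 < Nat.size a := lt_of_lt_of_le hj h
  have ha : 0 < a := Nat.size_pos.mp hk
  have htop : ∀ n : Nat, 0 < n → n.testBit (Nat.size n - 1) = true := by
    intro n hn
    have h1 : 2 ^ (Nat.size n - 1) ≤ n := Nat.lt_size.mp (by have := Nat.size_pos.mpr hn; omega)
    have h2 : n < 2 ^ Nat.size n := Nat.lt_size_self n
    rw [Nat.testBit_eq_decide_div_mod_eq]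
    have hs : Nat.size n = (Nat.size n - 1) + 1 := by have := Nat.size_pos.mpr hn; omega
    have hpow : 2 ^ Nat.size n = 2 ^ (Nat.size n - 1) * 2 := by
      conv_lhs => rw [hs, pow_succ]
    have hdiv : n / 2 ^ (Nat.size n - 1) = 1 := by
      apply Nat.div_eq_of_lt_le (by simpa using h1)
      omega
    simp [hdiv]
  have hbits : ∀ i : Nat, Nat.size a - 1 ≤ i →
      (a ^^^ (b <<< (Nat.size a - Nat.size b))).testBit i = false := by
    intro i hi
    rw [Nat.testBit_xor, Nat.testBit_shiftLeft]
    rcases Nat.lt_or_ge i (Nat.size a) with hlt | hge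
    · have hieq : i = Nat.size a - 1 := by omega
      have h1 : a.testBit i = true := by rw [hieq]; exact htop a ha
      have hge2 : i ≥ Nat.size a - Nat.size b := by omega
      have h2 : b.testBit (i - (Nat.size a - Nat.size b)) = true := by
        have : i - (Nat.size a - Nat.size b) = Nat.size b - 1 := by omega
        rw [this]; exact htop b hb
      simp [h1, h2, hge2]
    · have h1 : a.testBit i = false :=
        Nat.testBit_lt_two_pow (lt_of_lt_of_le (Nat.lt_size_self a) (Nat.pow_le_pow_right (by omega) hge))
      have h2 : b.testBit (i - (Nat.size a - Nat.size b)) = false := by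
        apply Nat.testBit_lt_two_pow
        exact lt_of_lt_of_le (Nat.lt_size_self b) (Nat.pow_le_pow_right (by omega) (by omega))
      simp [h1, h2]
  have hlt : a ^^^ (b <<< (Nat.size a - Nat.size b)) < 2 ^ (Nat.size a - 1) :=
    Nat.lt_pow_two_of_testBit _ hbits
  have := Nat.size_le.mpr hlt
  omega

def altLoop (divisor : Nat) (dividend : Nat) : Nat :=
  if h : 0 < divisor ∧ Nat.size divisor ≤ Nat.size dividend then
    altLoop divisor (dividend ^^^ (divisor <<< (Nat.size dividend - Nat.size divisor)))
  else dividend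
termination_by Nat.size dividend
decreasing_by exact size_xor_shift_lt _ _ h.1 h.2

-- Bit-length helpers: A's hand-rolled loop and Python's int.bit_length both compute Nat.size.
theorem size_div_two_succ (n : Nat) (h : n ≠ 0) : Nat.size n = Nat.size (n / 2) + 1 := by
  have h2 : n / 2 < 2 ^ Nat.size (n / 2) := Nat.lt_size_self _
  have hub : n < 2 ^ (Nat.size (n / 2) + 1) := by
    have : n ≤ 2 * (n / 2) + 1 := by omega
    calc n ≤ 2 * (n / 2) + 1 := this
      _ < 2 * 2 ^ Nat.size (n / 2) := by omega
      _ = 2 ^ (Nat.size (n / 2) + 1) := by ring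
  have hlb : 2 ^ Nat.size (n / 2) ≤ n := by
    by_cases hm : Nat.size (n / 2) = 0
    · simp [hm]; omega
    · have h1 : 2 ^ (Nat.size (n / 2) - 1) ≤ n / 2 := Nat.lt_size.mp (by omega)
      have hs2 : Nat.size (n / 2) = (Nat.size (n / 2) - 1) + 1 := by omega
      have hpow : 2 ^ Nat.size (n / 2) = 2 ^ (Nat.size (n / 2) - 1) * 2 := by
        conv_lhs => rw [hs2, pow_succ]
      omega
  have hle : Nat.size n ≤ Nat.size (n / 2) + 1 := Nat.size_le.mpr hub
  have hge : Nat.size (n / 2) + 1 ≤ Nat.size n := Nat.lt_size.mpr hlb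
  omega

theorem bit_length_go_eq_size (n : Nat) : bit_length_go n = Nat.size n := by
  induction n using Nat.strong_induction_on with
  | _ n ih =>
    rw [bit_length_go]
    by_cases h : n = 0
    · simp [h]
    · simp only [h, if_false]
      rw [ih (n / 2) (Nat.div_lt_self (by omega) (by omega))]
      exact (size_div_two_succ n h).symm

theorem bitLength_eq_size (m : Nat) : PySem.Int.bitLength (m : Int) = Nat.size m := by
  induction m using Nat.strong_induction_on with
  | _ m ih =>
    by_cases h : m = 0
    · subst h; simp [PySem.Int.bitLength_zero]
    · rw [PySem.Int.bitLength_natCast (m := m) (by omega)]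
      rw [ih (m / 2) (Nat.div_lt_self (by omega) (by omega))]
      exact (size_div_two_succ m h).symm

theorem testBit_of_size_eq {d c : Nat} (hsz : Nat.size d = c + 1) :
    d.testBit c = true := by
  have h1 : 2 ^ c ≤ d := Nat.lt_size.mp (by omega)
  have h2 : d < 2 ^ (c + 1) := by rw [← hsz]; exact Nat.lt_size_self d
  rw [Nat.testBit_eq_decide_div_mod_eq]
  have hdiv : d / 2 ^ c = 1 := by
    apply Nat.div_eq_of_lt_le (by simpa using h1)
    calc d < 2 ^ (c + 1) := h2
      _ = 2 * 2 ^ c := by ring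
  simp [hdiv]

-- ===================== A-side: the for-loop computes altLoop =====================

-- A Nat model of A's for-loop: counter c processes i = c-1 down to 0.
def foldAN (v : Nat) : Nat → Nat → Nat
  | 0, d => d
  | c + 1, d => foldAN v c (if d.testBit (c + Nat.size v - 1) then d ^^^ (v <<< c) else d)

theorem foldAN_eq_altLoop (v : Nat) (hv : 0 < v) :
    ∀ c d, Nat.size d < c + Nat.size v → foldAN v c d = altLoop v d := by
  have hj : 0 < Nat.size v := Nat.size_pos.mpr hv
  intro c
  induction c with
  | zero =>
    intro d hd
    rw [foldAN, altLoop]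
    have : ¬ (0 < v ∧ Nat.size v ≤ Nat.size d) := by omega
    simp [this]
  | succ c ih =>
    intro d hd
    rw [foldAN]
    by_cases hbit : d.testBit (c + Nat.size v - 1)
    · have hge : 2 ^ (c + Nat.size v - 1) ≤ d := Nat.ge_two_pow_of_testBit hbit
      have hsz : Nat.size d = c + Nat.size v := by
        have := Nat.lt_size.mpr hge
        omega
      have hd0 : 0 < d := Nat.size_pos.mp (by omega)
      have hstep : altLoop v d = altLoop v (d ^^^ (v <<< c)) := by
        rw [altLoop]
        have hcond : 0 < v ∧ Nat.size v ≤ Nat.size d := ⟨hv, by omega⟩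
        have hshift : Nat.size d - Nat.size v = c := by omega
        simp [hcond, hshift]
      rw [hstep]
      simp only [hbit, if_true]
      apply ih
      have := size_xor_shift_lt v d hv (by omega)
      have hshift : Nat.size d - Nat.size v = c := by omega
      rw [hshift] at this
      omega
    · have hsz : Nat.size d < c + Nat.size v := by
        rcases Nat.lt_or_ge (Nat.size d) (c + Nat.size v) with h | h
        · exact h
        · exfalso
          have : d.testBit (c + Nat.size v - 1) = true :=
            testBit_of_size_eq (by omega)
          simp [this] at hbit
      simp only [hbit]
      exact ih d hsz

-- Casts between Python-int (Int) bit operations on nonnegative values and Nat operations.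
theorem intLand_natCast (a b : Nat) : Int.land (a : Int) (b : Int) = ((a &&& b : Nat) : Int) := rfl
theorem intXor_natCast (a b : Nat) : Int.xor (a : Int) (b : Int) = ((a ^^^ b : Nat) : Int) := rfl
theorem intShiftLeft_natCast (a : Nat) (k : Nat) :
    Int.shiftLeft (a : Int) k = ((a <<< k : Nat) : Int) := rfl
theorem intOneShift (k : Nat) : Int.shiftLeft 1 k = ((1 <<< k : Nat) : Int) := rfl

-- One iteration of A's Int loop body, seen on the Nat side.
theorem stepInt_eq (v d c : Nat) (hj : 0 < Nat.size v) :
    (if Int.land (d : Int) (Int.shiftLeft 1 ((c : Int) + (Nat.size v : Int) - 1).toNat) ≠ 0 then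
       Int.xor (d : Int) (Int.shiftLeft (v : Int) (c : Int).toNat)
     else (d : Int))
    = ((if d.testBit (c + Nat.size v - 1) then d ^^^ (v <<< c) else d : Nat) : Int) := by
  have htn : ((c : Int) + (Nat.size v : Int) - 1).toNat = c + Nat.size v - 1 := by omega
  have htc : ((c : Int)).toNat = c := by omega
  rw [htn, htc, intOneShift, intLand_natCast, intShiftLeft_natCast, intXor_natCast]
  have hbit : (d &&& (1 <<< (c + Nat.size v - 1)) : Nat)
      = if d.testBit (c + Nat.size v - 1) then 2 ^ (c + Nat.size v - 1) else 0 := by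
    rw [Nat.one_shiftLeft, Nat.and_two_pow]
    cases h : d.testBit (c + Nat.size v - 1) <;> simp
  by_cases hb : d.testBit (c + Nat.size v - 1)
  · rw [if_pos hb, if_pos]
    rw [hbit, if_pos hb]
    exact_mod_cast Int.natCast_ne_zero.mpr (by positivity)
  · rw [if_neg hb, if_neg]
    rw [hbit, if_neg hb]
    simp

-- Bridge: A's Int fold over range(K, -1, -1) is foldAN with counter K+1.
theorem foldInt_eq_foldAN (v : Nat) (hv : 0 < v) (K : Nat) (d : Nat) :
    (PySem.List.pyRange (K : Int) (-1) (-1)).foldl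
      (fun x i =>
        if Int.land x (Int.shiftLeft 1 (i + (Nat.size v : Int) - 1).toNat) ≠ 0 then
          Int.xor x (Int.shiftLeft (v : Int) i.toNat)
        else x) (d : Int)
    = ((foldAN v (K + 1) d : Nat) : Int) := by
  have hj : 0 < Nat.size v := Nat.size_pos.mpr hv
  induction K generalizing d with
  | zero =>
    rw [PySem.List.pyRange_neg_one_cons (by omega)]
    rw [PySem.List.pyRange_neg_one_eq_nil (by omega)]
    simp only [List.foldl_cons, List.foldl_nil]
    rw [stepInt_eq v d 0 hj]
    rfl
  | succ K ih =>
    have hcast : ((K + 1 : Nat) : Int) = (K : Int) + 1 := by push_cast; ring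
    rw [hcast, PySem.List.pyRange_neg_one_cons (by omega)]
    have ht : (K : Int) + 1 - 1 = (K : Int) := by ring
    rw [ht, ← hcast]
    simp only [List.foldl_cons]
    rw [stepInt_eq v d (K + 1) hj, ih]
    rfl

-- A (inside Pre_) computes the greedy reduction altLoop.
theorem cl_div_eq_altLoop (dividend divisor : Int) (h0 : 0 ≤ dividend) (h1 : 1 ≤ divisor) :
    cl_div dividend divisor = ((altLoop divisor.toNat dividend.toNat : Nat) : Int) := by
  unfold cl_div
  set D : Nat := dividend.toNat with hD
  set v : Nat := divisor.toNat with hv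
  have hDiv : dividend = (D : Int) := by omega
  have hVis : divisor = (v : Int) := by omega
  have hv0 : 0 < v := by omega
  have hj : 0 < Nat.size v := Nat.size_pos.mpr hv0
  have hbl1 : bit_length dividend = (Nat.size D : Int) := by
    unfold bit_length; rw [← hD, bit_length_go_eq_size]
  have hbl2 : bit_length divisor = (Nat.size v : Int) := by
    unfold bit_length; rw [← hv, bit_length_go_eq_size]
  simp only [hbl1, hbl2]
  by_cases hlt : (Nat.size D : Int) < (Nat.size v : Int)
  · rw [if_pos hlt]
    rw [hDiv]
    conv_rhs => rw [altLoop]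
    have : ¬ (0 < v ∧ Nat.size v ≤ Nat.size D) := by omega
    simp [this]
  · rw [if_neg hlt]
    have hge : Nat.size v ≤ Nat.size D := by omega
    have hK : (Nat.size D : Int) - (Nat.size v : Int) = ((Nat.size D - Nat.size v : Nat) : Int) := by
      omega
    rw [hK, hDiv, hVis]
    rw [foldInt_eq_foldAN v hv0 (Nat.size D - Nat.size v) D]
    rw [foldAN_eq_altLoop v hv0 (Nat.size D - Nat.size v + 1) D (by omega)]

-- ===================== B-side: the shift register computes altLoop =====================

-- The greedy reduction always ends below the divisor's bit length.
theorem size_altLoop_lt (v : Nat) (hv : 0 < v) : ∀ d,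
    Nat.size (altLoop v d) < Nat.size v := by
  intro d
  induction hn : Nat.size d using Nat.strong_induction_on generalizing d with
  | _ n ih =>
    rw [altLoop]
    by_cases h : 0 < v ∧ Nat.size v ≤ Nat.size d
    · rw [dif_pos h]
      exact ih _ (hn ▸ size_xor_shift_lt v d h.1 h.2) _ rfl
    · rw [dif_neg h]
      rcases Nat.lt_or_ge (Nat.size d) (Nat.size v) with hlt | hge
      · exact hlt
      · exact absurd ⟨hv, hge⟩ h

-- One shift-register step, seen through altLoop: for a reduced remainder r,
-- appending a bit and conditionally XORing the divisor IS the greedy reduction of bit b r.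
theorem altLoop_bit (v : Nat) (hv : 0 < v) (b : Bool) (r : Nat) (hr : Nat.size r < Nat.size v) :
    (if (Nat.bit b r).testBit (Nat.size v - 1) then Nat.bit b r ^^^ v else Nat.bit b r)
      = altLoop v (Nat.bit b r) := by
  set r' := Nat.bit b r with hr'
  have hr'le : Nat.size r' ≤ Nat.size v := by
    apply Nat.size_le.mpr
    have h1 : r < 2 ^ Nat.size r := Nat.lt_size_self r
    have h2 : (2:Nat) ^ (Nat.size r + 1) ≤ 2 ^ Nat.size v := Nat.pow_le_pow_right (by omega) (by omega)
    have h3 : r' = 2 * r + b.toNat := Nat.bit_val b r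
    have h4 : b.toNat ≤ 1 := Bool.toNat_le b
    calc r' = 2 * r + b.toNat := h3
      _ < 2 ^ (Nat.size r + 1) := by rw [pow_succ]; omega
      _ ≤ 2 ^ Nat.size v := h2
  by_cases hb : r'.testBit (Nat.size v - 1)
  · have hge : 2 ^ (Nat.size v - 1) ≤ r' := Nat.ge_two_pow_of_testBit hb
    have hsz : Nat.size r' = Nat.size v := by
      have := Nat.lt_size.mpr hge
      have hvpos := Nat.size_pos.mpr hv
      omega
    rw [if_pos hb]
    conv_rhs => rw [altLoop]
    have hcond : 0 < v ∧ Nat.size v ≤ Nat.size r' := ⟨hv, by omega⟩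
    rw [dif_pos hcond]
    have hshift : Nat.size r' - Nat.size v = 0 := by omega
    rw [hshift]
    have hred : Nat.size (r' ^^^ (v <<< 0)) < Nat.size v := by
      have := size_xor_shift_lt v r' hv (by omega)
      rw [hshift] at this
      omega
    conv_rhs => rw [altLoop]
    rw [dif_neg (by omega)]
    rw [Nat.shiftLeft_zero]
  · have hsz : Nat.size r' < Nat.size v := by
      rcases Nat.lt_or_ge (Nat.size r') (Nat.size v) with h | h
      · exact h
      · exfalso
        have hvpos := Nat.size_pos.mpr hv
        have : r'.testBit (Nat.size v - 1) = true := testBit_of_size_eq (by omega)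
        simp [this] at hb
    rw [if_neg hb]
    conv_rhs => rw [altLoop]
    rw [dif_neg (by omega)]

-- altLoop is invariant under first reducing the tail: the homomorphism the invariant needs.
theorem altLoop_bit_congr (v : Nat) (hv : 0 < v) (b : Bool) (d : Nat) :
    altLoop v (Nat.bit b (altLoop v d)) = altLoop v (Nat.bit b d) := by
  induction hn : Nat.size d using Nat.strong_induction_on generalizing d with
  | _ n ih =>
    by_cases h : 0 < v ∧ Nat.size v ≤ Nat.size d
    · have hd0 : 0 < d := by
        have := Nat.size_pos.mpr hv
        exact Nat.size_pos.mp (by omega)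
      set k := Nat.size d - Nat.size v with hk
      set d' := d ^^^ (v <<< k) with hd'
      have hrec : altLoop v d = altLoop v d' := by
        conv_lhs => rw [altLoop]
        rw [dif_pos h]
      have hsz' : Nat.size d' < Nat.size d := size_xor_shift_lt v d h.1 h.2
      have step1 : altLoop v (Nat.bit b (altLoop v d)) = altLoop v (Nat.bit b d') := by
        rw [hrec]
        exact ih _ (hn ▸ hsz') d' rfl
      rw [step1]
      -- bit b d' = bit b d ^^^ (v <<< (k+1))
      have hbit : Nat.bit b d' = Nat.bit b d ^^^ (v <<< (k + 1)) := by
        have h1 : v <<< (k + 1) = Nat.bit false (v <<< k) := by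
          rw [Nat.bit_val, Nat.shiftLeft_eq, Nat.shiftLeft_eq, pow_succ]
          simp
          ring
        rw [h1, Nat.xor_bit]
        simp
        rw [hd']
      -- size (bit b d) = size d + 1, so the first greedy step on bit b d uses shift k+1
      have hbne : Nat.bit b d ≠ 0 := by
        rw [Nat.bit_val]
        omega
      have hbsz : Nat.size (Nat.bit b d) = Nat.size d + 1 := Nat.size_bit hbne
      have hfinal : altLoop v (Nat.bit b d) = altLoop v (Nat.bit b d') := by
        conv_lhs => rw [altLoop]
        have hcond : 0 < v ∧ Nat.size v ≤ Nat.size (Nat.bit b d) := ⟨hv, by omega⟩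
        rw [dif_pos hcond]
        rw [hbsz]
        have hsh : Nat.size d + 1 - Nat.size v = k + 1 := by omega
        rw [hsh, ← hbit]
      rw [hfinal]
    · have : altLoop v d = d := by
        rw [altLoop, dif_neg h]
      rw [this]

-- Nat model of B's loop: counter c processes bit positions c-1 down to 0 of D.
def foldBN (D v : Nat) : Nat → Nat → Nat
  | 0, r => r
  | c + 1, r =>
    foldBN D v c
      (if (Nat.bit (D.testBit c) r).testBit (Nat.size v - 1) then
         Nat.bit (D.testBit c) r ^^^ v
       else Nat.bit (D.testBit c) r)

theorem foldBN_eq_altLoop (D v : Nat) (hv : 0 < v) :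
    ∀ c r, r = altLoop v (D >>> c) → foldBN D v c r = altLoop v D := by
  intro c
  induction c with
  | zero =>
    intro r hr
    rw [foldBN, hr, Nat.shiftRight_zero]
  | succ c ih =>
    intro r hr
    rw [foldBN]
    apply ih
    have hrs : Nat.size r < Nat.size v := hr ▸ size_altLoop_lt v hv _
    rw [altLoop_bit v hv (D.testBit c) r hrs, hr]
    rw [altLoop_bit_congr v hv (D.testBit c) (D >>> (c + 1))]
    congr 1
    have h1 : (D >>> c).testBit 0 = D.testBit c := by
      rw [Nat.testBit_shiftRight, Nat.add_zero]
    have h2 : (D >>> c) >>> 1 = D >>> (c + 1) := by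
      rw [← Nat.shiftRight_add]
    conv_rhs => rw [← Nat.bit_testBit_zero_shiftRight_one (D >>> c)]
    rw [h1, h2]

-- B's Int loop body on casts.
theorem stepIntB_eq (D v r c : Nat) :
    (if PySem.Int.band
          (PySem.Int.bor (Int.shiftLeft (r : Int) 1)
            (PySem.Int.band ((D : Int) >>> (((c : Int)).toNat : Int)) 1))
          ((1 <<< (Nat.size v - 1) : Nat) : Int) ≠ 0 then
       PySem.Int.bxor
         (PySem.Int.bor (Int.shiftLeft (r : Int) 1)
           (PySem.Int.band ((D : Int) >>> (((c : Int)).toNat : Int)) 1))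
         (v : Int)
     else
       PySem.Int.bor (Int.shiftLeft (r : Int) 1)
         (PySem.Int.band ((D : Int) >>> (((c : Int)).toNat : Int)) 1))
    = ((if (Nat.bit (D.testBit c) r).testBit (Nat.size v - 1) then
          Nat.bit (D.testBit c) r ^^^ v
        else Nat.bit (D.testBit c) r : Nat) : Int) := by
  have htc : ((c : Int)).toNat = c := by omega
  rw [htc]
  have hshr : ((D : Int) >>> ((c : Nat) : Int)) = ((D >>> c : Nat) : Int) := by
    simp [Nat.shiftRight_eq_div_pow]
  have hband1 : PySem.Int.band ((D >>> c : Nat) : Int) 1 = (((D >>> c) &&& 1 : Nat) : Int) := by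
    exact_mod_cast PySem.Int.band_natCast (D >>> c) 1
  have hshl : Int.shiftLeft ((r : Nat) : Int) 1 = ((r <<< 1 : Nat) : Int) := rfl
  have hbor : PySem.Int.bor ((r <<< 1 : Nat) : Int) (((D >>> c) &&& 1 : Nat) : Int)
      = (((r <<< 1) ||| ((D >>> c) &&& 1) : Nat) : Int) := by
    exact_mod_cast PySem.Int.bor_natCast (r <<< 1) ((D >>> c) &&& 1)
  have horbit : (r <<< 1) ||| ((D >>> c) &&& 1) = Nat.bit (D.testBit c) r := by
    have e1 : r <<< 1 = Nat.bit false r := by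
      rw [Nat.bit_val, Nat.shiftLeft_eq]
      simp
      ring
    have e2 : (D >>> c) &&& 1 = Nat.bit ((D >>> c).testBit 0) 0 := by
      rw [Nat.and_one_is_mod, Nat.bit_val, Nat.testBit_zero]
      rcases Nat.mod_two_eq_zero_or_one (D >>> c) with h | h <;> simp [h]
    rw [e1, e2, Nat.lor_bit]
    simp
  simp only [hshr, hband1, hshl, hbor, horbit]
  set r' := Nat.bit (D.testBit c) r with hr'
  have hxor : PySem.Int.bxor ((r' : Nat) : Int) ((v : Nat) : Int) = ((r' ^^^ v : Nat) : Int) := by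
    exact_mod_cast PySem.Int.bxor_natCast r' v
  have hband2 : PySem.Int.band ((r' : Nat) : Int) ((1 <<< (Nat.size v - 1) : Nat) : Int)
      = ((r' &&& (1 <<< (Nat.size v - 1)) : Nat) : Int) := by
    exact_mod_cast PySem.Int.band_natCast r' (1 <<< (Nat.size v - 1))
  simp only [hband2, hxor]
  have hbit : (r' &&& (1 <<< (Nat.size v - 1)) : Nat)
      = if r'.testBit (Nat.size v - 1) then 2 ^ (Nat.size v - 1) else 0 := by
    rw [Nat.one_shiftLeft, Nat.and_two_pow]
    cases h : r'.testBit (Nat.size v - 1) <;> simp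
  by_cases hb : r'.testBit (Nat.size v - 1)
  · rw [if_pos hb, if_pos]
    rw [hbit, if_pos hb]
    exact_mod_cast Int.natCast_ne_zero.mpr (by positivity)
  · rw [if_neg hb, if_neg]
    rw [hbit, if_neg hb]
    simp

-- Bridge: B's Int fold over range(c-1, -1, -1) is foldBN with counter c.
theorem foldIntB_eq_foldBN (D v : Nat) :
    ∀ (c : Nat) (r : Nat),
    (PySem.List.pyRange ((c : Int) - 1) (-1) (-1)).foldl
      (fun x i =>
        let r' := PySem.Int.bor (Int.shiftLeft x 1) (PySem.Int.band ((D : Int) >>> i.toNat) 1)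
        if PySem.Int.band r' ((1 <<< (Nat.size v - 1) : Nat) : Int) ≠ 0 then
          PySem.Int.bxor r' (v : Int)
        else r') (r : Int)
    = ((foldBN D v c r : Nat) : Int) := by
  intro c
  induction c with
  | zero =>
    intro r
    rw [show ((0 : Nat) : Int) - 1 = -1 by norm_num]
    rw [PySem.List.pyRange_neg_one_eq_nil (by omega)]
    rw [List.foldl_nil, foldBN]
  | succ c ih =>
    intro r
    have hc1 : ((c + 1 : Nat) : Int) - 1 = (c : Int) := by push_cast; ring
    rw [hc1, PySem.List.pyRange_neg_one_cons (by omega)]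
    simp only [List.foldl_cons]
    rw [stepIntB_eq D v r c, ih]
    rw [foldBN]

-- B (inside Pre_) computes the same greedy reduction.
theorem cl_div_alt_eq_altLoop (dividend divisor : Int) (h0 : 0 ≤ dividend) (h1 : 1 ≤ divisor) :
    cl_div_alt dividend divisor = ((altLoop divisor.toNat dividend.toNat : Nat) : Int) := by
  unfold cl_div_alt
  set D : Nat := dividend.toNat with hD
  set v : Nat := divisor.toNat with hv
  have hDiv : dividend = (D : Int) := by omega
  have hVis : divisor = (v : Int) := by omega
  have hv0 : 0 < v := by omega
  have hj : 0 < Nat.size v := Nat.size_pos.mpr hv0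
  rw [hDiv, hVis, bitLength_eq_size, bitLength_eq_size]
  have htn : ((Nat.size v : Int) - 1).toNat = Nat.size v - 1 := by omega
  rw [htn, intOneShift]
  refine Eq.trans (foldIntB_eq_foldBN D v (Nat.size D) 0) ?_
  congr 1
  apply foldBN_eq_altLoop D v hv0
  have hsh : D >>> Nat.size D = 0 := by
    rw [Nat.shiftRight_eq_div_pow]
    exact Nat.div_eq_of_lt (Nat.lt_size_self D)
  have hz : ¬ (0 < v ∧ Nat.size v ≤ Nat.size 0) := by
    rintro ⟨h1, h2⟩
    rw [Nat.size_zero] at h2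
    have := Nat.size_pos.mpr h1
    omega
  rw [hsh, altLoop, dif_neg hz]

-- ===== VERDICT (by name: the statement is the Claim_ definition above) =====
theorem cl_div_spec : Claim_equal_cl_div := by
  intro dividend divisor _ hpre
  obtain ⟨h0, h1⟩ := hpre
  unfold Spec_cl_div
  rw [cl_div_eq_altLoop dividend divisor h0 h1, cl_div_alt_eq_altLoop dividend divisor h0 h1]
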